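-- pv_equiv track=rewrite | github.com/19pawel970415/PythonExercises | finalTest.py | zwrocTrzyCyfParzPierwszaMniejszaOdTrzeciej
-- ===== SOURCE A (Python) =====
-- def zwrocTrzyCyfParzPierwszaMniejszaOdTrzeciej(liczby):
--
--     trzyCyfParzPierwszaMniejszaOdTrzeciej = []
--
--     for liczba in liczby:
--
--         if liczba >= 0:
--             if len(str(liczba)) == 3 and liczba % 2 == 0:
--                 b = str(liczba)[0]
--                 c = str(liczba)[2]
--                 bInt = int(b)
--                 cInt = int(c)
--                 if bInt < cInt:
--                     trzyCyfParzPierwszaMniejszaOdTrzeciej.append(liczba)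
--
--         else:
--             if len(str(liczba)) == 4 and liczba % 2 == 0:
--                 b = str(liczba)[1]
--                 c = str(liczba)[3]
--                 bInt = int(b)
--                 cInt = int(c)
--                 if bInt < cInt:
--                     trzyCyfParzPierwszaMniejszaOdTrzeciej.append(liczba)
--
--     return trzyCyfParzPierwszaMniejszaOdTrzeciej
-- ===== SOURCE B (Python) =====
-- def zwrocTrzyCyfParzPierwszaMniejszaOdTrzeciej(liczby):
--     return [x for x in liczby
--             if 100 <= abs(x) <= 999 and x % 2 == 0 and abs(x) // 100 < abs(x) % 10]
-- ===== Notes on version B (the rewrite author's own statement) =====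
-- stated objective: simpler
-- what changed: B drops A's string conversion and per-digit character indexing entirely: one list comprehension tests 100 <= abs(x) <= 999, x % 2 == 0 and abs(x)//100 < abs(x)%10, unifying A's separate positive/negative string-index branches into a single arithmetic filter.
import Mathlib
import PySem

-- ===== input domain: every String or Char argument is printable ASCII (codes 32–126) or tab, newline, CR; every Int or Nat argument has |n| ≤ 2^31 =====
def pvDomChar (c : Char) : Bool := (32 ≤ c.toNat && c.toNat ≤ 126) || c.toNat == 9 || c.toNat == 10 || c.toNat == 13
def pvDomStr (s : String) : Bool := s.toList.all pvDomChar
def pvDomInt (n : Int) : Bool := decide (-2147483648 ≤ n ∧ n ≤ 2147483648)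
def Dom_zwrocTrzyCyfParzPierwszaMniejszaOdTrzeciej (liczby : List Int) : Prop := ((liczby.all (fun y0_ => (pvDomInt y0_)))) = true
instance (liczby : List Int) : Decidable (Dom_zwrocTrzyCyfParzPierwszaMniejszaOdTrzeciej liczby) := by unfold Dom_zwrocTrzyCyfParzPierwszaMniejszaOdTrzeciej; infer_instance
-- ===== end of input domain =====

-- B replaces A's string-indexing digit tests by one arithmetic range+divmod filter (simpler; same output).

-- ===== PORT A =====
-- str(liczba) is ported as PySem.Int.toChars (exact: (PySem.Int.toStr n).toList = toChars n, lemma toList_toStr);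
-- int(one-digit string) as (PySem.Int.ofChars? [c]).getD 0 — the .getD 0 never fires under A's length guard.
def zwrocTrzyCyfParzPierwszaMniejszaOdTrzeciej (liczby : List Int) : List Int :=
  liczby.foldl (fun acc liczba =>
    if liczba ≥ 0 then
      if PySem.List.len (PySem.Int.toChars liczba) = 3 ∧ PySem.Int.mod liczba 2 = 0 then
        let b := PySem.List.pyGetD (PySem.Int.toChars liczba) 0 ' '
        let c := PySem.List.pyGetD (PySem.Int.toChars liczba) 2 ' '
        let bInt := (PySem.Int.ofChars? [b]).getD 0
        let cInt := (PySem.Int.ofChars? [c]).getD 0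
        if bInt < cInt then acc ++ [liczba] else acc
      else acc
    else
      if PySem.List.len (PySem.Int.toChars liczba) = 4 ∧ PySem.Int.mod liczba 2 = 0 then
        let b := PySem.List.pyGetD (PySem.Int.toChars liczba) 1 ' '
        let c := PySem.List.pyGetD (PySem.Int.toChars liczba) 3 ' '
        let bInt := (PySem.Int.ofChars? [b]).getD 0
        let cInt := (PySem.Int.ofChars? [c]).getD 0
        if bInt < cInt then acc ++ [liczba] else acc
      else acc) []

-- ===== PORT B =====
def zwrocTrzyCyfParzPierwszaMniejszaOdTrzeciej_alt (liczby : List Int) : List Int :=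
  liczby.filter (fun x =>
    decide (100 ≤ |x| ∧ |x| ≤ 999) && decide (PySem.Int.mod x 2 = 0)
      && decide (PySem.Int.floordiv |x| 100 < PySem.Int.mod |x| 10))

-- ===== PRECONDITION & SPEC =====
def Spec_zwrocTrzyCyfParzPierwszaMniejszaOdTrzeciej (liczby : List Int) (out : List Int) : Prop := out = zwrocTrzyCyfParzPierwszaMniejszaOdTrzeciej_alt liczby
instance (liczby : List Int) (out : List Int) : Decidable (Spec_zwrocTrzyCyfParzPierwszaMniejszaOdTrzeciej liczby out) := by unfold Spec_zwrocTrzyCyfParzPierwszaMniejszaOdTrzeciej; infer_instance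

-- ===== CLAIM (what is proved, stated in full; the proofs are below) =====
def Claim_equal_zwrocTrzyCyfParzPierwszaMniejszaOdTrzeciej : Prop := ∀ (liczby : List Int), Dom_zwrocTrzyCyfParzPierwszaMniejszaOdTrzeciej liczby → Spec_zwrocTrzyCyfParzPierwszaMniejszaOdTrzeciej liczby (zwrocTrzyCyfParzPierwszaMniejszaOdTrzeciej liczby)

-- ===== LEMMAS AND PROOFS =====

-- exact decimal expansion for one-, two- and three-digit naturals
lemma pvCore1 (f m : Nat) (hm : m ≤ 9) (hf : 1 ≤ f) (ds : List Char) :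
    Nat.toDigitsCore 10 f m ds = Nat.digitChar m :: ds := by
  obtain ⟨f', rfl⟩ : ∃ f', f = f' + 1 := ⟨f - 1, by omega⟩
  have h0 : m / 10 = 0 := by omega
  have h1 : m % 10 = m := by omega
  simp [Nat.toDigitsCore, h0, h1]

lemma pvCore2 (f m : Nat) (h1 : 10 ≤ m) (h2 : m ≤ 99) (hf : 2 ≤ f) (ds : List Char) :
    Nat.toDigitsCore 10 f m ds = Nat.digitChar (m / 10) :: Nat.digitChar (m % 10) :: ds := by
  obtain ⟨f', rfl⟩ : ∃ f', f = f' + 1 := ⟨f - 1, by omega⟩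
  have h0 : m / 10 ≠ 0 := by omega
  simp only [Nat.toDigitsCore, h0, if_false]
  exact pvCore1 f' (m / 10) (by omega) (by omega) _

lemma pvCore3 (f m : Nat) (h1 : 100 ≤ m) (h2 : m ≤ 999) (hf : 3 ≤ f) (ds : List Char) :
    Nat.toDigitsCore 10 f m ds
      = Nat.digitChar (m / 100) :: Nat.digitChar (m / 10 % 10) :: Nat.digitChar (m % 10) :: ds := by
  obtain ⟨f', rfl⟩ : ∃ f', f = f' + 1 := ⟨f - 1, by omega⟩
  have h0 : m / 10 ≠ 0 := by omega
  simp only [Nat.toDigitsCore, h0, if_false]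
  have := pvCore2 f' (m / 10) (by omega) (by omega) (by omega) (Nat.digitChar (m % 10) :: ds)
  rw [this, Nat.div_div_eq_div_mul]

-- a natural with at least four decimal digits yields at least four characters
lemma pvCoreGe4 (f : Nat) : ∀ (m : Nat) (ds : List Char), 1000 ≤ m → m < f →
    4 ≤ (Nat.toDigitsCore 10 f m ds).length - ds.length := by
  induction f with
  | zero => intro m ds h1 h2; omega
  | succ f ih =>
    intro m ds h1 _
    have h0 : m / 10 ≠ 0 := by omega
    simp only [Nat.toDigitsCore, h0, if_false]
    by_cases hc : 1000 ≤ m / 10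
    · have := ih (m / 10) (Nat.digitChar (m % 10) :: ds) hc (by omega)
      simp only [List.length_cons] at this ⊢
      omega
    · rw [pvCore3 f (m / 10) (by omega) (by omega) (by omega)]
      simp only [List.length_cons]
      omega

lemma pvLen3_iff (m : Nat) : (Nat.toDigits 10 m).length = 3 ↔ 100 ≤ m ∧ m ≤ 999 := by
  unfold Nat.toDigits
  constructor
  · intro h
    by_contra hc
    rcases Nat.lt_or_ge m 100 with hlt | hge
    · rcases Nat.lt_or_ge m 10 with h9 | h10
      · rw [pvCore1 (m + 1) m (by omega) (by omega)] at h; simp at h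
      · rw [pvCore2 (m + 1) m (by omega) (by omega) (by omega)] at h; simp at h
    · have h999 : 1000 ≤ m := by omega
      have := pvCoreGe4 (m + 1) m [] h999 (by omega)
      simp only [List.length_nil] at this; omega
  · rintro ⟨h1, h2⟩
    rw [pvCore3 (m + 1) m h1 h2 (by omega)]
    simp

lemma pvOfCharsDigit (d : Nat) (hd : d < 10) :
    (PySem.Int.ofChars? [Nat.digitChar d]).getD 0 = (d : Int) := by
  interval_cases d <;> decide

-- A's per-element step equals "append iff B's predicate holds"
lemma pvStep (acc : List Int) (x : Int) :
    (if x ≥ 0 then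
      if PySem.List.len (PySem.Int.toChars x) = 3 ∧ PySem.Int.mod x 2 = 0 then
        let b := PySem.List.pyGetD (PySem.Int.toChars x) 0 ' '
        let c := PySem.List.pyGetD (PySem.Int.toChars x) 2 ' '
        let bInt := (PySem.Int.ofChars? [b]).getD 0
        let cInt := (PySem.Int.ofChars? [c]).getD 0
        if bInt < cInt then acc ++ [x] else acc
      else acc
    else
      if PySem.List.len (PySem.Int.toChars x) = 4 ∧ PySem.Int.mod x 2 = 0 then
        let b := PySem.List.pyGetD (PySem.Int.toChars x) 1 ' '
        let c := PySem.List.pyGetD (PySem.Int.toChars x) 3 ' '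
        let bInt := (PySem.Int.ofChars? [b]).getD 0
        let cInt := (PySem.Int.ofChars? [c]).getD 0
        if bInt < cInt then acc ++ [x] else acc
      else acc)
    = (if (decide (100 ≤ |x| ∧ |x| ≤ 999) && decide (PySem.Int.mod x 2 = 0)
          && decide (PySem.Int.floordiv |x| 100 < PySem.Int.mod |x| 10)) = true
       then acc ++ [x] else acc) := by
  by_cases hx : x ≥ 0
  · -- nonnegative branch: toChars x = Nat.toDigits 10 x.toNat
    have habs : |x| = (x.toNat : Int) := by
      rw [abs_of_nonneg hx]; omega
    have htc : PySem.Int.toChars x = Nat.toDigits 10 x.toNat := by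
      simp [PySem.Int.toChars, not_lt.mpr hx]
    rw [if_pos hx, htc, habs]
    by_cases hlen : (Nat.toDigits 10 x.toNat).length = 3
    · obtain ⟨h1, h2⟩ := (pvLen3_iff _).mp hlen
      have hd := pvCore3 (x.toNat + 1) x.toNat h1 h2 (by omega) []
      unfold Nat.toDigits at hlen ⊢
      rw [hd]
      have hb : PySem.List.pyGetD
          [Nat.digitChar (x.toNat / 100), Nat.digitChar (x.toNat / 10 % 10), Nat.digitChar (x.toNat % 10)] 0 ' '
          = Nat.digitChar (x.toNat / 100) := PySem.List.pyGetD_zero_cons _ _ _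
      have hcc : PySem.List.pyGetD
          [Nat.digitChar (x.toNat / 100), Nat.digitChar (x.toNat / 10 % 10), Nat.digitChar (x.toNat % 10)] 2 ' '
          = Nat.digitChar (x.toNat % 10) := by
        have : ((2 : Int)) = ((2 : Nat) : Int) := by norm_num
        rw [this, PySem.List.pyGetD_natCast]; rfl
      simp only [hb, hcc, PySem.List.len_eq, List.length_cons, List.length_nil]
      rw [pvOfCharsDigit (x.toNat / 100) (by omega), pvOfCharsDigit (x.toNat % 10) (by omega)]
      have hfd : PySem.Int.floordiv ((x.toNat : Int)) 100 = ((x.toNat / 100 : Nat) : Int) := by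
        rw [PySem.Int.floordiv_eq_ediv_of_pos (by norm_num)]
        omega
      have hmd : PySem.Int.mod ((x.toNat : Int)) 10 = ((x.toNat % 10 : Nat) : Int) := by
        rw [PySem.Int.mod_eq_emod_of_pos (by norm_num)]
        omega
      rw [hfd, hmd]
      simp only [PySem.Int.mod_eq_zero_iff_dvd, Bool.and_eq_true, decide_eq_true_eq]
      split_ifs <;> first | rfl | (exfalso; omega)
    · -- length ≠ 3: A skips; B's range test fails
      have hr : ¬ (100 ≤ x.toNat ∧ x.toNat ≤ 999) := fun h => hlen ((pvLen3_iff _).mpr h)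
      rw [if_neg, if_neg]
      · simp only [Bool.and_eq_true, decide_eq_true_eq]
        intro h; exact hr ⟨by omega, by omega⟩
      · simp only [PySem.List.len_eq]
        intro h; exact hlen (by omega)
  · -- negative branch: toChars x = '-' :: Nat.toDigits 10 x.natAbs
    have hxneg : x < 0 := by omega
    have habs : |x| = (x.natAbs : Int) := by rw [abs_of_neg hxneg]; omega
    have htc : PySem.Int.toChars x = '-' :: Nat.toDigits 10 x.natAbs := by
      simp [PySem.Int.toChars, hxneg]
    rw [if_neg hx, htc, habs]
    by_cases hlen : (Nat.toDigits 10 x.natAbs).length = 3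
    · obtain ⟨h1, h2⟩ := (pvLen3_iff _).mp hlen
      have hd := pvCore3 (x.natAbs + 1) x.natAbs h1 h2 (by omega) []
      unfold Nat.toDigits at hlen ⊢
      rw [hd]
      have hb : PySem.List.pyGetD
          ['-', Nat.digitChar (x.natAbs / 100), Nat.digitChar (x.natAbs / 10 % 10), Nat.digitChar (x.natAbs % 10)] 1 ' '
          = Nat.digitChar (x.natAbs / 100) := by
        have : ((1 : Int)) = ((1 : Nat) : Int) := by norm_num
        rw [this, PySem.List.pyGetD_natCast]; rfl
      have hcc : PySem.List.pyGetD
          ['-', Nat.digitChar (x.natAbs / 100), Nat.digitChar (x.natAbs / 10 % 10), Nat.digitChar (x.natAbs % 10)] 3 ' '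
          = Nat.digitChar (x.natAbs % 10) := by
        have : ((3 : Int)) = ((3 : Nat) : Int) := by norm_num
        rw [this, PySem.List.pyGetD_natCast]; rfl
      simp only [hb, hcc, PySem.List.len_eq, List.length_cons, List.length_nil]
      rw [pvOfCharsDigit (x.natAbs / 100) (by omega), pvOfCharsDigit (x.natAbs % 10) (by omega)]
      have hfd : PySem.Int.floordiv ((x.natAbs : Int)) 100 = ((x.natAbs / 100 : Nat) : Int) := by
        rw [PySem.Int.floordiv_eq_ediv_of_pos (by norm_num)]
        omega
      have hmd : PySem.Int.mod ((x.natAbs : Int)) 10 = ((x.natAbs % 10 : Nat) : Int) := by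
        rw [PySem.Int.mod_eq_emod_of_pos (by norm_num)]
        omega
      rw [hfd, hmd]
      simp only [PySem.Int.mod_eq_zero_iff_dvd, Bool.and_eq_true, decide_eq_true_eq]
      split_ifs <;> first | rfl | (exfalso; omega)
    · have hr : ¬ (100 ≤ x.natAbs ∧ x.natAbs ≤ 999) := fun h => hlen ((pvLen3_iff _).mpr h)
      rw [if_neg, if_neg]
      · simp only [Bool.and_eq_true, decide_eq_true_eq]
        intro h; exact hr ⟨by omega, by omega⟩
      · simp only [PySem.List.len_eq, List.length_cons]
        intro h; exact hlen (by omega)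

lemma pvFold (liczby : List Int) :
    zwrocTrzyCyfParzPierwszaMniejszaOdTrzeciej liczby
      = zwrocTrzyCyfParzPierwszaMniejszaOdTrzeciej_alt liczby := by
  unfold zwrocTrzyCyfParzPierwszaMniejszaOdTrzeciej zwrocTrzyCyfParzPierwszaMniejszaOdTrzeciej_alt
  suffices h : ∀ acc : List Int,
      liczby.foldl (fun acc liczba =>
        if liczba ≥ 0 then
          if PySem.List.len (PySem.Int.toChars liczba) = 3 ∧ PySem.Int.mod liczba 2 = 0 then
            let b := PySem.List.pyGetD (PySem.Int.toChars liczba) 0 ' '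
            let c := PySem.List.pyGetD (PySem.Int.toChars liczba) 2 ' '
            let bInt := (PySem.Int.ofChars? [b]).getD 0
            let cInt := (PySem.Int.ofChars? [c]).getD 0
            if bInt < cInt then acc ++ [liczba] else acc
          else acc
        else
          if PySem.List.len (PySem.Int.toChars liczba) = 4 ∧ PySem.Int.mod liczba 2 = 0 then
            let b := PySem.List.pyGetD (PySem.Int.toChars liczba) 1 ' '
            let c := PySem.List.pyGetD (PySem.Int.toChars liczba) 3 ' '
            let bInt := (PySem.Int.ofChars? [b]).getD 0
            let cInt := (PySem.Int.ofChars? [c]).getD 0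
            if bInt < cInt then acc ++ [liczba] else acc
          else acc) acc
      = acc ++ liczby.filter (fun x =>
          decide (100 ≤ |x| ∧ |x| ≤ 999) && decide (PySem.Int.mod x 2 = 0)
            && decide (PySem.Int.floordiv |x| 100 < PySem.Int.mod |x| 10)) by
    simpa using h []
  induction liczby with
  | nil => intro acc; simp
  | cons y ys ih =>
    intro acc
    rw [List.foldl_cons, pvStep acc y, List.filter_cons]
    by_cases hy : (decide (100 ≤ |y| ∧ |y| ≤ 999) && decide (PySem.Int.mod y 2 = 0)
        && decide (PySem.Int.floordiv |y| 100 < PySem.Int.mod |y| 10)) = true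
    · rw [if_pos hy, if_pos hy, ih (acc ++ [y]), List.append_assoc]; rfl
    · rw [if_neg hy, if_neg hy, ih acc]

-- ===== VERDICT (by name: the statement is the Claim_ definition above) =====
theorem zwrocTrzyCyfParzPierwszaMniejszaOdTrzeciej_spec : Claim_equal_zwrocTrzyCyfParzPierwszaMniejszaOdTrzeciej := by
  intro liczby _
  exact pvFold liczby
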